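-- pv_equiv track=rewrite | github.com/B23DCAT011/Python | CodePtit/PY01012.py | check
-- ===== SOURCE A (Python) =====
-- def check(n):
--     n = str(n)
--     if(len(n) %2 == 1):
--         return False
--     if( n != n[::-1]):
--         return False
--     for item in n:
--         if(int(item) % 2 ==1):
--             return False
--     return True
-- ===== SOURCE B (Python) =====
-- def check(n):
--     s = str(n)
--     if len(s) % 2 == 1:
--         return False
--     i, j = 0, len(s) - 1
--     while i < j:
--         if s[i] != s[j]:
--             return False
--         if int(s[i]) % 2 == 1:
--             return False
--         i += 1
--         j -= 1
--     return True
-- ===== Notes on version B (the rewrite author's own statement) =====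
-- stated objective: alternative
-- what changed: Replaces A's three passes (full-string reversal+comparison, then a full digit-parity scan) with a single half-length two-pointer loop that checks the palindrome mirror and digit evenness together; parity is tested only on the first half, which suffices once the mirror check passes.
import Mathlib
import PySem

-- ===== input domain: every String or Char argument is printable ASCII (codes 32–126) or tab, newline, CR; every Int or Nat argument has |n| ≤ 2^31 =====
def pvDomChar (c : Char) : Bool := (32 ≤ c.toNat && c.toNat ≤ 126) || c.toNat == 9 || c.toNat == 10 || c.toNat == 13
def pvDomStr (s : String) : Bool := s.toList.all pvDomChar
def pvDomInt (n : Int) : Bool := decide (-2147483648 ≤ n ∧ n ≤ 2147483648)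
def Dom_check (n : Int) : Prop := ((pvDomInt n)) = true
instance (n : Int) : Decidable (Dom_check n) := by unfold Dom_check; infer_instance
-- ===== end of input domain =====

-- B fuses A's reversal pass and digit-parity pass into one half-length two-pointer loop (alternative decomposition, same cost class).

-- ===== PORT A =====
-- int(item) % 2 == 1 : int of a one-char string; the .getD 0 default is unreachable in A,
-- since the loop only runs on a palindrome str(n), whose chars are then all digits.
def oddDigit (c : Char) : Bool := PySem.Int.mod ((PySem.Int.ofChars? [c]).getD 0) 2 == 1

-- 'for item in n: if int(item) % 2 == 1: return False' / 'return True'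
def checkLoop : List Char → Bool
  | [] => true
  | c :: cs => if oddDigit c then false else checkLoop cs

def check (n : Int) : Bool :=
  let s := PySem.Int.toChars n          -- n = str(n), as its character list
  if PySem.Chars.len s % 2 == 1 then false
  else if s ≠ (PySem.List.slice? s none none (-1)).getD [] then false  -- n != n[::-1] ([::-1] never raises)
  else checkLoop s

-- ===== PORT B =====
-- 'while i < j: ...' ; s[i]/s[j] via getD — indices stay in range (0 ≤ i < j ≤ len-1)
def altLoop (s : List Char) (i j : Nat) : Bool :=
  if i < j then
    if s.getD i ' ' ≠ s.getD j ' ' then false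
    else if oddDigit (s.getD i ' ') then false
    else altLoop s (i + 1) (j - 1)
  else true
termination_by j - i

def check_alt (n : Int) : Bool :=
  let s := PySem.Int.toChars n
  if PySem.Chars.len s % 2 == 1 then false
  else altLoop s 0 (PySem.Chars.len s - 1).toNat  -- j = len(s)-1 ≥ 0

-- ===== PRECONDITION & SPEC =====
def Spec_check (n : Int) (out : Bool) : Prop := out = check_alt n
instance (n : Int) (out : Bool) : Decidable (Spec_check n out) := by unfold Spec_check; infer_instance

-- ===== CLAIM (what is proved, stated in full; the proofs are below) =====
def Claim_equal_check : Prop := ∀ (n : Int), Dom_check n → Spec_check n (check n)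

-- ===== LEMMAS AND PROOFS =====

theorem altLoop_cons (rest : List Char) (c : Char) :
    ∀ j i, altLoop (c :: rest) (i + 1) (j + 1) = altLoop rest i j := by
  intro j
  induction j using Nat.strong_induction_on with
  | _ j ih =>
    intro i
    conv_lhs => rw [altLoop]
    conv_rhs => rw [altLoop]
    simp only [List.getD_cons_succ, Nat.add_lt_add_iff_right]
    by_cases h : i < j
    · obtain ⟨j', rfl⟩ : ∃ j', j = j' + 1 := ⟨j - 1, by omega⟩
      simp only [if_pos h, Nat.add_sub_cancel]
      rw [ih j' (by omega) (i + 1)]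
    · simp [h]

theorem altLoop_concat (m : List Char) (d : Char) :
    ∀ j i, j < m.length → altLoop (m ++ [d]) i j = altLoop m i j := by
  intro j
  induction j using Nat.strong_induction_on with
  | _ j ih =>
    intro i hj
    conv_lhs => rw [altLoop]
    conv_rhs => rw [altLoop]
    by_cases h : i < j
    · have hi : i < m.length := by omega
      have gi : (m ++ [d]).getD i ' ' = m.getD i ' ' := by
        simp [List.getD, List.getElem?_append_left, hi]
      have gj : (m ++ [d]).getD j ' ' = m.getD j ' ' := by
        simp [List.getD, List.getElem?_append_left, hj]
      rw [gi, gj]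
      simp only [if_pos h]
      rw [ih (j - 1) (by omega) (i + 1) (by omega)]
    · simp [h]

theorem checkLoop_append (xs ys : List Char) :
    checkLoop (xs ++ ys) = (checkLoop xs && checkLoop ys) := by
  induction xs with
  | nil => simp [checkLoop]
  | cons c cs ih => by_cases h : oddDigit c <;> simp [checkLoop, h, ih]

theorem main_lemma : ∀ (N : Nat) (l : List Char), l.length = N → l.length % 2 = 0 →
    altLoop l 0 (l.length - 1) = (decide (l = l.reverse) && checkLoop l) := by
  intro N
  induction N using Nat.strong_induction_on with
  | _ N ih =>
    intro l hN hev
    match l with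
    | [] => simp [altLoop, checkLoop]
    | [c] => simp at hev
    | c :: t =>
      rcases t.eq_nil_or_concat with rfl | ⟨m, d, rfl⟩
      · simp at hev
      · -- l = c :: m ++ [d]
        simp only [List.concat_eq_append] at hN hev ⊢
        have hgj : (c :: (m ++ [d])).getD (m.length + 1) ' ' = d := by
          simp [List.getD]
        have hL1 : (c :: (m ++ [d])).length - 1 = m.length + 1 := by simp
        conv_lhs => rw [altLoop]
        rw [hL1, if_pos (by omega), hgj]
        simp only [List.getD_cons_zero]
        have hrev : (c :: (m ++ [d])).reverse = d :: (m.reverse ++ [c]) := by simp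
        by_cases hcd : c = d
        · subst hcd
          simp only [ne_eq, not_true_eq_false, if_false]
          by_cases hodd : oddDigit c
          · rw [if_pos hodd]
            have : checkLoop (c :: (m ++ [c])) = false := by simp [checkLoop, hodd]
            simp [this]
          · rw [if_neg hodd]
            have heq : decide (c :: (m ++ [c]) = (c :: (m ++ [c])).reverse)
                = decide (m = m.reverse) := by
              rw [hrev]
              simp
            have hcl : checkLoop (c :: (m ++ [c])) = checkLoop m := by
              simp [checkLoop, hodd, checkLoop_append, Bool.and_true]
            rw [heq, hcl]
            cases m with
            | nil =>
              rw [altLoop]; simp [checkLoop]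
            | cons a as =>
              have hml2 : (a :: as).length % 2 = 0 := by
                simp at hev ⊢; omega
              have hih := ih (a :: as).length (by simp at hN ⊢; omega) (a :: as) rfl hml2
              have step1 : altLoop (c :: ((a :: as) ++ [c])) (0 + 1) (((a :: as).length - 1) + 1)
                  = altLoop ((a :: as) ++ [c]) 0 ((a :: as).length - 1) :=
                altLoop_cons _ c _ 0
              have step2 : altLoop ((a :: as) ++ [c]) 0 ((a :: as).length - 1)
                  = altLoop (a :: as) 0 ((a :: as).length - 1) :=
                altLoop_concat _ c _ 0 (by simp)
              have hidx : ((a :: as).length - 1) + 1 = (a :: as).length := by simp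
              rw [hidx] at step1
              have : (0 : Nat) + 1 = 1 := rfl
              rw [this] at step1
              rw [show (a :: as).length + 1 - 1 = (a :: as).length from rfl]
              rw [step1, step2, hih]
        · rw [if_pos (by simpa using hcd)]
          have : (c :: (m ++ [d]) = (c :: (m ++ [d])).reverse) ↔ False := by
            rw [hrev]
            constructor
            · intro h; exact hcd (by injection h)
            · exact False.elim
          have hb : decide (c :: (m ++ [d]) = (c :: (m ++ [d])).reverse) = false := by
            simp only [decide_eq_false_iff_not, this]
            exact not_false
          rw [hb, Bool.false_and]

-- ===== VERDICT (by name: the statement is the Claim_ definition above) =====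
theorem check_spec : Claim_equal_check := by
  intro n _
  unfold Spec_check check check_alt
  simp only [PySem.List.slice?_none_none_neg_one, Option.getD_some, PySem.Chars.len_eq]
  set s := PySem.Int.toChars n with hs
  by_cases hodd : ((s.length : Int) % 2 == 1)
  · simp [hodd]
  · have hev : s.length % 2 = 0 := by
      simp at hodd; omega
    have h1 : ((s.length : Int) - 1).toNat = s.length - 1 := by omega
    simp only [hodd, if_false, Bool.false_eq_true, h1]
    rw [main_lemma s.length s rfl hev]
    by_cases hpal : s = s.reverse
    · rw [if_neg (not_not_intro hpal), decide_eq_true hpal, Bool.true_and]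
    · rw [if_pos hpal, decide_eq_false hpal, Bool.false_and]
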